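-- pv_equiv track=rewrite | github.com/manohar12346/Leetcodemanohar | 21. The Modified String - GFG/21.-the-modified-string.py | modified
-- ===== SOURCE A (Python) =====
-- def modified(s):
--     #code here
--     cnt=0
--     c=""
--     ans=0
--     for i in range(len(s)):
--         if cnt==3:
--             ans+=1
--             cnt=1
--         if c==s[i]:
--             cnt+=1
--         else:
--             c=s[i]
--             cnt=1
--     if cnt==3:
--         return ans+1
--     return ans
-- ===== SOURCE B (Python) =====
-- def modified(s):
--     total = 0
--     i = 0
--     n = len(s)
--     while i < n:
--         j = i
--         while j < n and s[j] == s[i]: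
--             j += 1
--         total += (j - i - 1) // 2
--         i = j
--     return total
-- ===== Notes on version B (the rewrite author's own statement) =====
-- stated objective: alternative
-- what changed: B scans each maximal run of equal characters with a two-pointer inner loop and adds (run_length - 1) // 2 per run, instead of A's per-character cap-at-3-and-reset counter with a deferred post-loop check.
import Mathlib
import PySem

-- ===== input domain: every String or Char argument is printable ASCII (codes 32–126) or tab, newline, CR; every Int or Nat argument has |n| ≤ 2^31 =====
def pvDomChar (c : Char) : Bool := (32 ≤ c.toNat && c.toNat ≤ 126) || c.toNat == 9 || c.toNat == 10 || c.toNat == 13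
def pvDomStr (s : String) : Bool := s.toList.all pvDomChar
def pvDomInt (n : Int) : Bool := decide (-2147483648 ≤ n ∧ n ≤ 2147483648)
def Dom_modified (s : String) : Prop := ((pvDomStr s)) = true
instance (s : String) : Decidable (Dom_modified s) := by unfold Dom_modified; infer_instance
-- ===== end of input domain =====

-- B is a two-pointer run scan (sum of (run_len - 1) // 2 per maximal run) instead of A's cap-and-reset counter; same cost, different decomposition.

-- ===== PORT A =====
-- A's for-loop over characters with state (cnt, c, ans); c is the last seen
-- one-character string, ported as List Char ([] for Python's initial "").
def modLoop : List Char → Int → List Char → Int → Int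
  | [], cnt, _, ans => if cnt = 3 then ans + 1 else ans
  | ch :: rest, cnt, c, ans =>
    let p := if cnt = 3 then ((1 : Int), ans + 1) else (cnt, ans)
    if c = [ch] then modLoop rest (p.1 + 1) c p.2
    else modLoop rest 1 [ch] p.2

def modified (s : String) : Int := modLoop s.toList 0 [] 0

-- ===== PORT B =====
-- inner while loop of Source B: first index j ≥ j0 with cs[j] ≠ c (or cs.length)
def runEnd (cs : List Char) (c : Char) (j : Nat) : Nat :=
  if h : j < cs.length then
    if cs[j] = c then runEnd cs c (j + 1) else j
  else j
termination_by cs.length - j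

theorem le_runEnd (cs : List Char) (c : Char) (j : Nat) : j ≤ runEnd cs c j := by
  fun_induction runEnd cs c j with
  | case1 j h hc ih => omega
  | case2 => omega
  | case3 => omega

theorem lt_runEnd (cs : List Char) (i : Nat) (h : i < cs.length) :
    i < runEnd cs cs[i] i := by
  rw [runEnd, dif_pos h, if_pos rfl]
  have := le_runEnd cs cs[i] (i + 1)
  omega

-- outer while loop of Source B
def modAltLoop (cs : List Char) (i : Nat) : Int :=
  if h : i < cs.length then
    (((runEnd cs cs[i] i - i - 1) / 2 : Nat) : Int) + modAltLoop cs (runEnd cs cs[i] i)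
  else 0
termination_by cs.length - i
decreasing_by have := lt_runEnd cs i h; omega

def modified_alt (s : String) : Int := modAltLoop s.toList 0

-- ===== PRECONDITION & SPEC =====
def Spec_modified (s : String) (out : Int) : Prop := out = modified_alt s
instance (s : String) (out : Int) : Decidable (Spec_modified s out) := by unfold Spec_modified; infer_instance

-- ===== CLAIM (what is proved, stated in full; the proofs are below) =====
def Claim_equal_modified : Prop := ∀ (s : String), Dom_modified s → Spec_modified s (modified s)

-- ===== LEMMAS AND PROOFS =====
-- proof-side intermediate: the run lengths of a list (current run char c, length n so far)
def runAux (c : Char) (n : Nat) : List Char → List Nat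
  | [] => [n]
  | d :: rest => if d = c then runAux c (n + 1) rest else n :: runAux d 1 rest

def runList : List Char → List Nat
  | [] => []
  | d :: rest => runAux d 1 rest

def sumF (l : List Nat) : Int := ((l.map (fun m => (m - 1) / 2)).sum : Nat)

theorem sumF_nil : sumF [] = 0 := rfl

theorem sumF_cons (a : Nat) (l : List Nat) :
    sumF (a :: l) = (((a - 1) / 2 : Nat) : Int) + sumF l := by
  simp [sumF]

theorem sumF_runAux_shift (rest : List Char) : ∀ (c : Char) (n : Nat), 1 ≤ n →
    sumF (runAux c (n + 2) rest) = 1 + sumF (runAux c n rest) := by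
  induction rest with
  | nil =>
    intro c n hn
    simp only [runAux, sumF_cons, sumF_nil]
    have : (n + 2 - 1) / 2 = (n - 1) / 2 + 1 := by omega
    rw [this]; push_cast; ring
  | cons d rest ih =>
    intro c n hn
    by_cases hdc : d = c
    · simp only [runAux, if_pos hdc]
      exact ih c (n + 1) (by omega)
    · simp only [runAux, if_neg hdc, sumF_cons]
      have : (n + 2 - 1) / 2 = (n - 1) / 2 + 1 := by omega
      rw [this]; push_cast; ring

theorem modLoop_eq (rest : List Char) : ∀ (c : Char) (n : Nat) (ans : Int),
    1 ≤ n → n ≤ 3 →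
    modLoop rest (n : Int) [c] ans = ans + sumF (runAux c n rest) := by
  induction rest with
  | nil =>
    intro c n ans h1 h3
    interval_cases n <;> simp [modLoop, runAux, sumF_cons, sumF_nil]
  | cons d rest ih =>
    intro c n ans h1 h3
    by_cases hdc : d = c
    · subst hdc
      interval_cases n
      · simpa [modLoop, runAux] using ih d 2 ans (by omega) (by omega)
      · simpa [modLoop, runAux] using ih d 3 ans (by omega) (by omega)
      · have h4 : sumF (runAux d 4 rest) = 1 + sumF (runAux d 2 rest) :=
          sumF_runAux_shift rest d 2 (by omega)
        have h2 := ih d 2 (ans + 1) (by omega) (by omega)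
        norm_num at h2
        simp only [modLoop, runAux]
        norm_num [h2, h4]
        ring
    · have hne : [c] ≠ [d] := by simpa using Ne.symm hdc
      interval_cases n
      · simpa [modLoop, runAux, hdc, hne, sumF_cons] using ih d 1 ans (by omega) (by omega)
      · simpa [modLoop, runAux, hdc, hne, sumF_cons] using ih d 1 ans (by omega) (by omega)
      · have h2 := ih d 1 (ans + 1) (by omega) (by omega)
        norm_num at h2
        simp only [modLoop, runAux, if_neg hdc, if_neg hne, sumF_cons]
        norm_num [h2]
        ring

theorem modified_eq (s : String) : modified s = sumF (runList s.toList) := by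
  unfold modified runList
  cases s.toList with
  | nil => simp [modLoop, sumF_nil]
  | cons d rest =>
    have : modLoop rest ((1 : Nat) : Int) [d] 0 = 0 + sumF (runAux d 1 rest) :=
      modLoop_eq rest d 1 0 (by omega) (by omega)
    simp only [modLoop]
    norm_num at this ⊢
    simpa using this

theorem runAux_drop (cs : List Char) (c : Char) (j : Nat) : ∀ n : Nat,
    runAux c n (cs.drop j) =
      (n + (runEnd cs c j - j)) :: runList (cs.drop (runEnd cs c j)) := by
  fun_induction runEnd cs c j with
  | case1 j h hc ih =>
    intro n
    rw [List.drop_eq_getElem_cons h]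
    simp only [runAux, if_pos hc]
    rw [ih (n + 1)]
    have := le_runEnd cs c (j + 1)
    congr 1
    omega
  | case2 j h hc =>
    intro n
    rw [List.drop_eq_getElem_cons h]
    simp only [runAux, if_neg hc, runList]
    congr 1
    omega
  | case3 j h =>
    intro n
    rw [List.drop_of_length_le (by omega)]
    simp [runAux, runList]

theorem modAltLoop_eq (cs : List Char) (i : Nat) :
    modAltLoop cs i = sumF (runList (cs.drop i)) := by
  fun_induction modAltLoop cs i with
  | case1 i h ih =>
    rw [List.drop_eq_getElem_cons h]
    simp only [runList]
    have hre : runEnd cs cs[i] i = runEnd cs cs[i] (i + 1) := by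
      rw [runEnd]; simp [h]
    rw [runAux_drop cs cs[i] (i + 1) 1, sumF_cons, ← hre, ih]
    have hgt := lt_runEnd cs i h
    congr 2
    omega
  | case2 i h =>
    rw [List.drop_of_length_le (by omega)]
    simp [runList, sumF_nil]

-- ===== VERDICT (by name: the statement is the Claim_ definition above) =====
theorem modified_spec : Claim_equal_modified := by
  intro s _
  unfold Spec_modified modified_alt
  rw [modified_eq, modAltLoop_eq]
  simp
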